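-- pv_equiv track=rewrite | github.com/cpernu/Backscatter-Buds | USRP old code/USRP Code/USRP_Reader_code/audiobackscatterreader/samcrow/fm0_encode.py | procedural_fm0_encode
-- ===== SOURCE A (Python) =====
-- def invert(b):
--     return int(not b)
--
-- def procedural_fm0_encode(data):
--     previous = 0
--     result = [0] * (2 * len(data))
--     for i, signalbit in enumerate(data):
--         # Use the mapping defined in the EPC specification:
--         # 0 => period with transition
--         # 1 => period without transition
--         if signalbit:
--             # Two samples opposite of previous
--             inverted = invert(previous)
--             result[2 * i] = inverted
--             result[2 * i + 1] = inverted
--             previous = inverted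
--         else:
--             # One sample the opposite of previous, then one previous
--             result[2 * i] = invert(previous);
--             result[2 * i + 1] = previous;
--             # previous does not change
--     return result
-- ===== SOURCE B (Python) =====
-- def procedural_fm0_encode(data):
--     # Prefix counts of truthy bits: counts[i] = number of truthy bits in data[:i].
--     counts = []
--     c = 0
--     for b in data:
--         counts.append(c)
--         if b:
--             c += 1
--     # Each output pair by closed-form parity from the prefix count.
--     out = []
--     for b, c in zip(data, counts):
--         first = (c + 1) % 2
--         out.append(first)
--         out.append(first if b else 1 - first)
--     return out
-- ===== Notes on version B (the rewrite author's own statement) =====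
-- stated objective: alternative
-- what changed: Replaces the threaded 'previous' state machine writing into a preallocated array with a prefix-count table plus a per-index closed-form parity formula building the output by appending pairs.
import Mathlib
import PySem

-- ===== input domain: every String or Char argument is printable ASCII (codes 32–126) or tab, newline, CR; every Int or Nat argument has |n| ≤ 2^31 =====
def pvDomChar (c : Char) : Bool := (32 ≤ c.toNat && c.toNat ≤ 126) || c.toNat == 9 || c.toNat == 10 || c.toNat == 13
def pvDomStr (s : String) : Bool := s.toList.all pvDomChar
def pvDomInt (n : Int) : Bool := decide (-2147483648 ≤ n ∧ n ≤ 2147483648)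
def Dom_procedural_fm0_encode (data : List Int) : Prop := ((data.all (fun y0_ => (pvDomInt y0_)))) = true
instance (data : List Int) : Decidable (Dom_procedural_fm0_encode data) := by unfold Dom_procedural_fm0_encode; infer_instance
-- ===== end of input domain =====

-- B replaces A's threaded `previous` state machine writing into a preallocated array with a
-- prefix-count table plus a per-index closed-form parity formula (objective: alternative).

-- ===== PORT A =====
-- invert(b) = int(not b)
def pvInvert (b : Int) : Int := if b ≠ 0 then 0 else 1

def procedural_fm0_encode (data : List Int) : List Int :=
  let previous : Int := 0
  let result : List Int := List.replicate (2 * data.length) 0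
  let st := (PySem.List.enumerate data 0).foldl
    (fun (st : Int × List Int) p =>
      let i := p.1
      let signalbit := p.2
      if signalbit ≠ 0 then
        let inverted := pvInvert st.1
        let result := PySem.List.pySetD st.2 (2 * i) inverted
        let result := PySem.List.pySetD result (2 * i + 1) inverted
        (inverted, result)
      else
        let result := PySem.List.pySetD st.2 (2 * i) (pvInvert st.1)
        let result := PySem.List.pySetD result (2 * i + 1) st.1
        (st.1, result))
    (previous, result)
  st.2

-- ===== PORT B =====
def procedural_fm0_encode_alt (data : List Int) : List Int :=
  -- counts[i] = number of truthy bits in data[:i]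
  let cs := data.foldl
    (fun (st : List Int × Int) b =>
      (st.1 ++ [st.2], if b ≠ 0 then st.2 + 1 else st.2))
    ([], 0)
  (data.zip cs.1).foldl
    (fun (out : List Int) p =>
      let first := PySem.Int.mod (p.2 + 1) 2
      out ++ [first, if p.1 ≠ 0 then first else 1 - first])
    []

-- ===== PRECONDITION & SPEC =====
def Spec_procedural_fm0_encode (data : List Int) (out : List Int) : Prop := out = procedural_fm0_encode_alt data
instance (data : List Int) (out : List Int) : Decidable (Spec_procedural_fm0_encode data out) := by unfold Spec_procedural_fm0_encode; infer_instance

-- ===== CLAIM (what is proved, stated in full; the proofs are below) =====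
def Claim_equal_procedural_fm0_encode : Prop := ∀ (data : List Int), Dom_procedural_fm0_encode data → Spec_procedural_fm0_encode data (procedural_fm0_encode data)

-- ===== LEMMAS AND PROOFS =====

-- reference encoding: pvEnc p t = the FM0 samples for bits t with previous level p
def pvEnc (p : Int) : List Int → List Int
  | [] => []
  | b :: t =>
    let s := if b ≠ 0 then pvInvert p else p
    pvInvert p :: s :: pvEnc s t

-- prefix counts of truthy bits, starting from c
def pvCounts (c : Int) : List Int → List Int
  | [] => []
  | b :: t => c :: pvCounts (if b ≠ 0 then c + 1 else c) t

theorem pv_set_append (done l : List Int) (x v : Int) :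
    (done ++ x :: l).set done.length v = done ++ v :: l := by
  induction done with
  | nil => rfl
  | cons d ds ih => simp [ih]

theorem pvA_invariant (t : List Int) (s : Nat) (p : Int) (done : List Int)
    (hd : done.length = 2 * s) :
    ((PySem.List.enumerate t (s : Int)).foldl
      (fun (st : Int × List Int) p =>
        if p.2 ≠ 0 then
          let inverted := pvInvert st.1
          (inverted, PySem.List.pySetD (PySem.List.pySetD st.2 (2 * p.1) inverted) (2 * p.1 + 1) inverted)
        else
          (st.1, PySem.List.pySetD (PySem.List.pySetD st.2 (2 * p.1) (pvInvert st.1)) (2 * p.1 + 1) st.1))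
      (p, done ++ List.replicate (2 * t.length) 0)).2
    = done ++ pvEnc p t := by
  induction t generalizing s p done with
  | nil => simp [PySem.List.enumerate, pvEnc]
  | cons b t ih =>
    rw [PySem.List.enumerate_cons]
    have h2 : (2 : Int) * (s : Int) = ((2 * s : Nat) : Int) := by push_cast; ring
    have h2' : (2 : Int) * (s : Int) + 1 = ((2 * s + 1 : Nat) : Int) := by push_cast; ring
    have hrep : List.replicate (2 * (b :: t).length) (0 : Int)
        = 0 :: 0 :: List.replicate (2 * t.length) 0 := by
      simp [List.length_cons]
      rw [show 2 * (t.length + 1) = (2 * t.length + 1) + 1 by ring]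
      simp [List.replicate_succ]
    have key : ∀ (v w : Int),
        PySem.List.pySetD (PySem.List.pySetD (done ++ 0 :: 0 :: List.replicate (2 * t.length) 0)
          (2 * (s : Int)) v) (2 * (s : Int) + 1) w
        = (done ++ [v, w]) ++ List.replicate (2 * t.length) 0 := by
      intro v w
      rw [h2', h2, PySem.List.pySetD_natCast, PySem.List.pySetD_natCast, ← hd,
          pv_set_append,
          show done ++ v :: 0 :: List.replicate (2 * t.length) 0
            = (done ++ [v]) ++ 0 :: List.replicate (2 * t.length) 0 by simp,
          show done.length + 1 = (done ++ [v]).length by simp,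
          pv_set_append]
      simp
    by_cases hb : b ≠ 0
    · simp only [List.foldl_cons, hrep, if_pos hb]
      rw [key]
      have hih := ih (s + 1) (pvInvert p) (done ++ [pvInvert p, pvInvert p]) (by simp [hd]; omega)
      rw [show ((s : Int) + 1) = (((s + 1 : Nat)) : Int) by push_cast; ring] at *
      rw [hih]
      simp [pvEnc, hb]
    · simp only [List.foldl_cons, hrep, if_neg hb]
      rw [key]
      have hih := ih (s + 1) p (done ++ [pvInvert p, p]) (by simp [hd]; omega)
      rw [show ((s : Int) + 1) = (((s + 1 : Nat)) : Int) by push_cast; ring] at *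
      rw [hih]
      simp only [ne_eq, not_not] at hb
      simp [pvEnc, hb]

theorem pvB_counts (t : List Int) (acc : List Int) (c : Int) :
    (t.foldl (fun (st : List Int × Int) b =>
        (st.1 ++ [st.2], if b ≠ 0 then st.2 + 1 else st.2)) (acc, c)).1
    = acc ++ pvCounts c t := by
  induction t generalizing acc c with
  | nil => simp [pvCounts]
  | cons b t ih =>
    simp only [List.foldl_cons, ih, pvCounts]
    simp

theorem pv_mod_succ (c : Int) (_hc : 0 ≤ c) :
    PySem.Int.mod (c + 1) 2 = pvInvert (PySem.Int.mod c 2) := by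
  rw [PySem.Int.mod_eq_emod_of_pos (by omega : (0:Int) < 2) (a := c + 1),
      PySem.Int.mod_eq_emod_of_pos (by omega : (0:Int) < 2) (a := c)]
  unfold pvInvert
  have h := Int.emod_emod_of_dvd c (dvd_refl 2)
  have h1 : c % 2 = 0 ∨ c % 2 = 1 := by omega
  rcases h1 with h1 | h1 <;> simp [h1] <;> omega

theorem pvB_zip (t : List Int) (c : Int) (hc : 0 ≤ c) (acc : List Int) :
    ((t.zip (pvCounts c t)).foldl
      (fun (out : List Int) p =>
        out ++ [PySem.Int.mod (p.2 + 1) 2,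
                if p.1 ≠ 0 then PySem.Int.mod (p.2 + 1) 2 else 1 - PySem.Int.mod (p.2 + 1) 2]) acc)
    = acc ++ pvEnc (PySem.Int.mod c 2) t := by
  induction t generalizing c acc with
  | nil => simp [pvCounts, pvEnc]
  | cons b t ih =>
    have hmod01 : PySem.Int.mod c 2 = 0 ∨ PySem.Int.mod c 2 = 1 := by
      rw [PySem.Int.mod_eq_emod_of_pos (by omega : (0:Int) < 2)]; omega
    have hfirst := pv_mod_succ c hc
    by_cases hb : b ≠ 0
    · simp only [pvCounts, if_pos hb, List.zip_cons_cons, List.foldl_cons]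
      rw [ih (c + 1) (by omega)]
      have huf : pvEnc (PySem.Int.mod c 2) (b :: t)
          = pvInvert (PySem.Int.mod c 2) :: pvInvert (PySem.Int.mod c 2)
            :: pvEnc (pvInvert (PySem.Int.mod c 2)) t := by
        simp only [pvEnc, if_pos hb]
      rw [huf, ← hfirst]
      simp
    · simp only [ne_eq, not_not] at hb
      simp only [pvCounts, hb, List.zip_cons_cons, List.foldl_cons]
      rw [show (if (0 : Int) ≠ 0 then c + 1 else c) = c from if_neg (by simp),
          ih c hc]
      have hsec : 1 - PySem.Int.mod (c + 1) 2 = PySem.Int.mod c 2 := by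
        rw [hfirst]; unfold pvInvert; rcases hmod01 with h | h <;> rw [h] <;> norm_num
      have huf : pvEnc (PySem.Int.mod c 2) ((0 : Int) :: t)
          = pvInvert (PySem.Int.mod c 2) :: PySem.Int.mod c 2
            :: pvEnc (PySem.Int.mod c 2) t := by
        simp only [pvEnc, if_neg (show ¬ (0 : Int) ≠ 0 by simp)]
      rw [huf, ← hfirst, ← hsec,
          show (if (0 : Int) ≠ 0 then PySem.Int.mod (c + 1) 2
                else 1 - PySem.Int.mod (c + 1) 2) = 1 - PySem.Int.mod (c + 1) 2
            from if_neg (by simp)]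
      simp

-- ===== VERDICT (by name: the statement is the Claim_ definition above) =====
theorem procedural_fm0_encode_spec : Claim_equal_procedural_fm0_encode := by
  intro data _
  unfold Spec_procedural_fm0_encode procedural_fm0_encode procedural_fm0_encode_alt
  simp only []
  rw [pvB_counts data [] 0, List.nil_append]
  have hA := pvA_invariant data 0 0 [] rfl
  have hB := pvB_zip data 0 (by norm_num) []
  simp only [Nat.cast_zero, List.nil_append] at hA hB
  rw [hB]
  have hm : PySem.Int.mod 0 2 = 0 := by decide
  rw [hm]
  exact hA
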